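-- pv_equiv track=rewrite | github.com/mccode-dev/mccode-antlr | src/mccode_antlr/integrations/ipython.py | _current_string_fragment
-- ===== SOURCE A (Python) =====
-- def _current_string_fragment(segment: str) -> str | None:
--     quote: str | None = None
--     escape = False
--     start = 0
--     for index, char in enumerate(segment):
--         if quote is not None:
--             if escape:
--                 escape = False
--             elif char == '\\':
--                 escape = True
--             elif char == quote:
--                 quote = None
--             continue
--         if char in {'"', "'"}:
--             quote = char
--             start = index + 1
--     if quote is None:
--         return None
--     return segment[start:]
-- ===== SOURCE B (Python) =====
-- def _current_string_fragment(segment: str) -> str | None: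
--     n = len(segment)
--     i = 0
--     while i < n:
--         c = segment[i]
--         if c == '"' or c == "'":
--             j = i + 1
--             while j < n:
--                 if segment[j] == '\\':
--                     j += 2
--                 elif segment[j] == c:
--                     break
--                 else:
--                     j += 1
--             if j >= n:
--                 return segment[i + 1:]
--             i = j + 1
--         else:
--             i += 1
--     return None
-- ===== Notes on version B (the rewrite author's own statement) =====
-- stated objective: alternative
-- what changed: Replaces A's single flat pass with a quote/escape/start state machine by nested scans: an outer loop that skips to the next quote character and an inner loop that consumes one quoted literal (a backslash skips the following character), returning the tail immediately when the literal is unterminated.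
import Mathlib
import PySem

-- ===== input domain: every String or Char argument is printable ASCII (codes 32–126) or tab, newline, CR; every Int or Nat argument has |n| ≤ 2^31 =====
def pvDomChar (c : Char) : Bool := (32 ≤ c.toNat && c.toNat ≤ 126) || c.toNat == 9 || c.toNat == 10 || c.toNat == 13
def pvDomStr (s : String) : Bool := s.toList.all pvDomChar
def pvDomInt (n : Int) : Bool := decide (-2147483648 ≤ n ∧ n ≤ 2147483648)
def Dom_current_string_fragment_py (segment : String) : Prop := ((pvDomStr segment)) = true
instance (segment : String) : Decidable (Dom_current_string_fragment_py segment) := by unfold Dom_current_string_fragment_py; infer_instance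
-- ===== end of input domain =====

-- B rewrites A's flat quote/escape/start state machine as nested scans: an outer
-- loop over quote characters and an inner loop consuming one quoted literal
-- (alternative decomposition, same cost). Return values agree on all inputs.

-- ===== PORT A =====
-- the for-loop of A: state (quote, escape, start), index carried like enumerate
def aLoop : List Char → Nat → Option Char → Bool → Nat → (Option Char × Nat)
  | [], _, quote, _, start => (quote, start)
  | c :: cs, idx, some q, escape, start =>
    if escape then aLoop cs (idx + 1) (some q) false start
    else if c = '\\' then aLoop cs (idx + 1) (some q) true start
    else if c = q then aLoop cs (idx + 1) none false start
    else aLoop cs (idx + 1) (some q) escape start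
  | c :: cs, idx, none, escape, start =>
    if c = '"' ∨ c = '\'' then aLoop cs (idx + 1) (some c) escape (idx + 1)
    else aLoop cs (idx + 1) none escape start

def current_string_fragment_py (segment : String) : Option String :=
  match aLoop segment.toList 0 none false 0 with
  | (none, _) => none
  | (some _, start) => some (String.ofList (segment.toList.drop start))  -- segment[start:], 0 ≤ start

-- ===== PORT B =====
-- inner loop of B: scan for the closing quote q, a backslash consumes the next char;
-- returns the rest after the closing quote, or none if unterminated
def bInner : Char → List Char → Option (List Char)
  | _, [] => none
  | q, c :: cs =>
    if c = '\\' then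
      match cs with
      | [] => none
      | _ :: cs' => bInner q cs'
    else if c = q then some cs
    else bInner q cs

-- needed by bOuter's termination (cited in decreasing_by)
theorem bInner_len : ∀ (q : Char) (cs rest : List Char), bInner q cs = some rest → rest.length < cs.length := by
  intro q cs
  induction q, cs using bInner.induct with
  | case1 => simp [bInner]
  | case2 => simp [bInner]
  | case3 q head cs' ih =>
    intro rest hr
    have hr' : bInner q cs' = some rest := by rw [bInner.eq_def] at hr; simpa using hr
    have := ih rest hr'
    simp only [List.length_cons]; omega
  | case4 c cs h =>
    intro rest hr
    have hcs : cs = rest := by rw [bInner.eq_def] at hr; simpa [h] using hr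
    subst hcs; simp
  | case5 q c cs h h' ih =>
    intro rest hr
    have hr' : bInner q cs = some rest := by rw [bInner.eq_def] at hr; simpa [h, h'] using hr
    have := ih rest hr'
    simp only [List.length_cons]; omega

-- outer loop of B: skip to the next quote character, then run the inner scan
def bOuter : List Char → Option (List Char)
  | [] => none
  | c :: cs =>
    if c = '"' ∨ c = '\'' then
      match h : bInner c cs with
      | none => some cs            -- unterminated: segment[i+1:]
      | some rest => bOuter rest
    else bOuter cs
  termination_by cs => cs.length
  decreasing_by
    · exact Nat.lt_succ_of_lt (bInner_len _ _ _ h)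
    · simp

def current_string_fragment_py_alt (segment : String) : Option String :=
  (bOuter segment.toList).map String.ofList

-- ===== PRECONDITION & SPEC =====
def Spec_current_string_fragment_py (segment : String) (out : Option String) : Prop := out = current_string_fragment_py_alt segment
instance (segment : String) (out : Option String) : Decidable (Spec_current_string_fragment_py segment out) := by unfold Spec_current_string_fragment_py; infer_instance

-- ===== CLAIM (what is proved, stated in full; the proofs are below) =====
def Claim_equal_current_string_fragment_py : Prop := ∀ (segment : String), Dom_current_string_fragment_py segment → Spec_current_string_fragment_py segment (current_string_fragment_py segment)

-- ===== LEMMAS AND PROOFS =====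

theorem bOuter_nil : bOuter [] = none := by rw [bOuter]

theorem bOuter_quote_none (c : Char) (cs : List Char) (hq : c = '"' ∨ c = '\'')
    (hb : bInner c cs = none) : bOuter (c :: cs) = some cs := by
  rw [bOuter, if_pos hq]; split <;> simp_all

theorem bOuter_quote_some (c : Char) (cs rest : List Char) (hq : c = '"' ∨ c = '\'')
    (hb : bInner c cs = some rest) : bOuter (c :: cs) = bOuter rest := by
  rw [bOuter, if_pos hq]; split <;> simp_all

theorem bOuter_skip (c : Char) (cs : List Char) (hq : ¬ (c = '"' ∨ c = '\'')) :
    bOuter (c :: cs) = bOuter cs := by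
  rw [bOuter, if_neg hq]

theorem drop_tail_eq {full cs : List Char} {c : Char} {idx : Nat}
    (h : full.drop idx = c :: cs) : full.drop (idx + 1) = cs := by
  rw [← List.tail_drop, h]; rfl

-- A's in-quote state run agrees with B's inner scan
theorem inner_agree : ∀ (q : Char) (cs : List Char) (idx start : Nat) (full : List Char),
    full.drop idx = cs →
    (bInner q cs = none → aLoop cs idx (some q) false start = (some q, start)) ∧
    (∀ rest, bInner q cs = some rest →
      ∃ idx', aLoop cs idx (some q) false start = aLoop rest idx' none false start ∧
        full.drop idx' = rest) := by
  intro q cs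
  induction q, cs using bInner.induct with
  | case1 q =>
    intro idx start full _
    exact ⟨fun _ => rfl, by rw [bInner.eq_def]; simp⟩
  | case2 q =>
    intro idx start full _
    exact ⟨fun _ => by simp [aLoop], by rw [bInner.eq_def]; simp⟩
  | case3 q head cs' ih =>
    intro idx start full hfull
    have h1 : full.drop (idx + 1) = head :: cs' := drop_tail_eq hfull
    have h2 : full.drop (idx + 1 + 1) = cs' := drop_tail_eq h1
    have step : aLoop ('\\' :: head :: cs') idx (some q) false start
        = aLoop cs' (idx + 1 + 1) (some q) false start := by
      simp [aLoop]
    have hb : bInner q ('\\' :: head :: cs') = bInner q cs' := by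
      rw [bInner.eq_def]; simp
    obtain ⟨ihn, ihs⟩ := ih (idx + 1 + 1) start full h2
    refine ⟨fun hn => ?_, fun rest hs => ?_⟩
    · rw [step]; exact ihn (by rw [← hb]; exact hn)
    · rw [step]; exact ihs rest (by rw [← hb]; exact hs)
  | case4 c cs h =>
    intro idx start full hfull
    refine ⟨fun hn => ?_, fun rest hs => ?_⟩
    · exact absurd hn (by rw [bInner.eq_def]; simp [h])
    · have : cs = rest := by rw [bInner.eq_def] at hs; simpa [h] using hs
      subst this
      refine ⟨idx + 1, ?_, drop_tail_eq hfull⟩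
      simp [aLoop, h]
  | case5 q c cs h h' ih =>
    intro idx start full hfull
    have step : aLoop (c :: cs) idx (some q) false start
        = aLoop cs (idx + 1) (some q) false start := by
      simp [aLoop, h, h']
    have hb : bInner q (c :: cs) = bInner q cs := by
      rw [bInner.eq_def]; simp [h, h']
    obtain ⟨ihn, ihs⟩ := ih (idx + 1) start full (drop_tail_eq hfull)
    refine ⟨fun hn => ?_, fun rest hs => ?_⟩
    · rw [step]; exact ihn (by rw [← hb]; exact hn)
    · rw [step]; exact ihs rest (by rw [← hb]; exact hs)

-- A's whole loop agrees with B's outer loop, given the suffix invariant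
theorem outer_agree : ∀ (n : Nat) (cs : List Char), cs.length ≤ n →
    ∀ (idx start : Nat) (full : List Char), full.drop idx = cs →
    bOuter cs = (aLoop cs idx none false start).1.map
      (fun _ => full.drop (aLoop cs idx none false start).2) := by
  intro n
  induction n with
  | zero =>
    intro cs hlen
    have : cs = [] := List.eq_nil_of_length_eq_zero (Nat.le_zero.mp hlen)
    subst this
    intro idx start full _
    simp [bOuter_nil, aLoop]
  | succ n ih =>
    intro cs hlen idx start full hfull
    match cs with
    | [] => simp [bOuter_nil, aLoop]
    | c :: cs' =>
      by_cases hq : c = '"' ∨ c = '\''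
      · have hfull' : full.drop (idx + 1) = cs' := drop_tail_eq hfull
        have stepA : aLoop (c :: cs') idx none false start
            = aLoop cs' (idx + 1) (some c) false (idx + 1) := by
          simp [aLoop, hq]
        obtain ⟨iann, ians⟩ := inner_agree c cs' (idx + 1) (idx + 1) full hfull'
        cases hb : bInner c cs' with
        | none =>
          have hend : aLoop cs' (idx + 1) (some c) false (idx + 1) = (some c, idx + 1) := iann hb
          rw [bOuter_quote_none c cs' hq hb, stepA, hend]
          simp [hfull']
        | some rest =>
          obtain ⟨idx', heq, hrest⟩ := ians rest hb
          have hlen' : rest.length ≤ n := by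
            have h1 := bInner_len c cs' rest hb
            simp at hlen; omega
          rw [bOuter_quote_some c cs' rest hq hb, stepA, heq]
          exact ih rest hlen' idx' (idx + 1) full hrest
      · have stepA : aLoop (c :: cs') idx none false start
            = aLoop cs' (idx + 1) none false start := by
          simp [aLoop, hq]
        rw [bOuter_skip c cs' hq, stepA]
        exact ih cs' (by simp at hlen; omega) (idx + 1) start full (drop_tail_eq hfull)

-- ===== VERDICT (by name: the statement is the Claim_ definition above) =====
theorem current_string_fragment_py_spec : Claim_equal_current_string_fragment_py := by
  intro segment _
  unfold Spec_current_string_fragment_py current_string_fragment_py current_string_fragment_py_alt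
  rw [outer_agree segment.toList.length segment.toList (le_refl _) 0 0 segment.toList (by simp)]
  cases h : aLoop segment.toList 0 none false 0 with
  | mk q st => cases q <;> simp
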